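-- pv_equiv track=rewrite | github.com/amshrestha2020/CodeSignal | CodeSignal/Graphs/CivilizationBirth.py | solution
-- ===== SOURCE A (Python) =====
-- def solution(count, votes):
--     from collections import defaultdict as ddict
--
--     # Initialize graph and law dictionary
--     g = ddict(lambda: [[], []])
--     law = ddict(lambda: -1)
--
--     # Populate the graph based on aborigines' votes
--     for index, (x, y) in enumerate(votes):
--         g[abs(x)][x > 0].append(index)
--         g[abs(y)][y > 0].append(index)
--
--     # Convert votes to sets for efficient operations
--     votes = list(map(set, votes))
--
--     # Recursive function to determine if a law can be enacted
--     def setting(pos, enact, tmp):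
--         enact ^= 1
--         curr = pos if enact else -pos
--         for person in g[pos][enact]:
--             choice = votes[person] - {curr}
--             if not choice:
--                 return 0
--             choice = choice.pop()
--             if tmp[abs(choice)] == -1:
--                 tmp[abs(choice)] = choice > 0
--                 if not setting(abs(choice), choice > 0, tmp):
--                     return 0
--             else:
--                 if tmp[abs(choice)] != (choice > 0):
--                     return 0
--         return 1
--
--     # Try to set laws based on aborigines' preferences
--     for i in range(1, count + 1):
--         if setting(i, 1, law.copy()):
--             law[i] = 1
--         elif setting(i, 0, law.copy()):
--             law[i] = 0
--         else:
--             return [-1] * count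
--
--     return list(law.values())
-- ===== SOURCE B (Python) =====
-- def solution(count, votes):
--     # Two-phase check per law: (1) collect the set of literals that would be
--     # falsified (plain reachability over the clause list, no trial assignments),
--     # (2) validate that set in one scan: no single-literal clause is wiped out,
--     # no enacted law is contradicted, and no variable is forced both ways.
--     def check(s, law):
--         # phase 1: falsified literals reachable from s
--         seen = [s]
--         frontier = [s]
--         while frontier:
--             new = []
--             for l in frontier:
--                 for x, y in votes:
--                     if x == l or y == l:
--                         c = y if x == l else x
--                         if c != l and law.get(abs(c), -1) == -1 and -c not in seen:
--                             seen.append(-c)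
--                             new.append(-c)
--             frontier = new
--         # phase 2: validate
--         forced = []
--         for l in seen:
--             for x, y in votes:
--                 if x == l or y == l:
--                     c = y if x == l else x
--                     if c == l:
--                         return False
--                     if law.get(abs(c), -1) != -1:
--                         if law[abs(c)] != (c > 0):
--                             return False
--                     elif c not in forced:
--                         forced.append(c)
--         return all(-c not in forced for c in forced)
--
--     law = {}
--     for i in range(1, count + 1):
--         if check(-i, law):
--             law[i] = 1
--         elif check(i, law):
--             law[i] = 0
--         else:
--             return [-1] * count
--     return list(law.values())
-- ===== Notes on version B (the rewrite author's own statement) =====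
-- stated objective: alternative
-- what changed: A decides each trial law by a recursive assign-as-you-go DFS (trial dict copied from law, consequences assigned and checked during the walk, early abort on the first conflict); B instead runs a two-phase check per trial: phase 1 collects the set of falsified literals by plain breadth-first reachability over the clause list without any trial assignments, and phase 2 validates that set in one scan (a wiped-out single-literal clause, a contradicted enacted law, or a variable forced both ways fails); …
-- outside the precondition, e.g. on solution(1, [(-1, -1), (0, 1)]): A returns [0], B returns [-1]
import Mathlib
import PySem

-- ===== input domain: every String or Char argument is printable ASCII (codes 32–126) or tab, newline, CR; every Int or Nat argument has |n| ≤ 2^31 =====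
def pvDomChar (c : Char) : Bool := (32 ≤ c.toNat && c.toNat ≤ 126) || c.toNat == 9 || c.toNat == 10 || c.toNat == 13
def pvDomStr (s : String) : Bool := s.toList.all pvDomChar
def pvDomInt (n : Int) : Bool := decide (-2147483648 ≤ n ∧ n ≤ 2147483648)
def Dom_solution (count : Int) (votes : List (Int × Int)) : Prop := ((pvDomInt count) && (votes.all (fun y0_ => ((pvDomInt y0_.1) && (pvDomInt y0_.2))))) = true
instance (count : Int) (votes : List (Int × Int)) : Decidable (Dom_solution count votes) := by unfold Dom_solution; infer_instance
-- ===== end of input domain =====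

-- B replaces A's assign-as-you-go recursive DFS (trial dict, early abort) by a two-phase
-- check: first plain reachability over the clause list collects the falsified literals,
-- then one validation scan rejects wiped-out clauses, contradicted laws and variables
-- forced both ways (objective: alternative; same greedy outer loop, same values).

-- ===== PORT A =====
-- g[abs(l)][l > 0].append(index): one literal's update of the defaultdict of [[],[]] buckets
def gStep (idx l : Int) (g : PySem.Dict Int (List Int × List Int)) : PySem.Dict Int (List Int × List Int) :=
  let b := g.getD |l| ([], [])
  g.insert |l| (if l > 0 then (b.1, b.2 ++ [idx]) else (b.1 ++ [idx], b.2))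

def buildG (votes : List (Int × Int)) : PySem.Dict Int (List Int × List Int) :=
  (PySem.List.enumerate votes 0).foldl (fun g p => gStep p.1 p.2.2 (gStep p.1 p.2.1 g)) PySem.Dict.empty

-- the recursive setting() and its inner 'for person in g[pos][enact]' loop; fuel only makes
-- the recursion total (it exceeds the recursion depth, which is bounded by one more than the
-- number of distinct variables that can become newly assigned, <= 2*len(votes)+1); the loop
-- helper takes the recursive call as the function argument `recur`
def settingForA (vs : List (PySem.Set Int))
    (recur : Int → Bool → PySem.Dict Int Int → Bool × PySem.Dict Int Int)
    (curr : Int) : List Int → PySem.Dict Int Int → Bool × PySem.Dict Int Int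
  | [], tmp => (true, tmp)
  | person :: rest, tmp =>
    match PySem.List.pyGet? vs person with
    | none => (false, tmp)                            -- IndexError guard; stored indices are in range
    | some s =>
      match PySem.Set.diff s [curr] with              -- votes[person] - {curr}
      | [] => (false, tmp)                            -- if not choice: return 0
      | choice :: _ =>                                -- .pop(): the set here has at most one element
        if tmp.getD |choice| (-1) = -1 then           -- defaultdict(-1) read
          let r := recur |choice| (decide (choice > 0)) (tmp.insert |choice| (if choice > 0 then 1 else 0))
          if r.1 then settingForA vs recur curr rest r.2 else (false, r.2)
        else if tmp.getD |choice| (-1) ≠ (if choice > 0 then (1 : Int) else 0) then (false, tmp)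
        else settingForA vs recur curr rest tmp

def settingA (g : PySem.Dict Int (List Int × List Int)) (vs : List (PySem.Set Int)) :
    Nat → Int → Bool → PySem.Dict Int Int → Bool × PySem.Dict Int Int
  | 0, _, _, tmp => (false, tmp)
  | f + 1, pos, enact, tmp =>
    let e := !enact                                   -- enact ^= 1
    let curr := if e then pos else -pos
    let b := g.getD pos ([], [])
    settingForA vs (fun pos' enact' tmp' => settingA g vs f pos' enact' tmp') curr (if e then b.2 else b.1) tmp

-- the outer 'for i in range(1, count+1)' loop over the remaining range, carrying the law dict
def outerA (count : Int) (g : PySem.Dict Int (List Int × List Int)) (vs : List (PySem.Set Int))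
    (fuel : Nat) : List Int → PySem.Dict Int Int → List Int
  | [], law => law.values
  | i :: rest, law =>
    if (settingA g vs fuel i true law).1 then outerA count g vs fuel rest (law.insert i 1)
    else if (settingA g vs fuel i false law).1 then outerA count g vs fuel rest (law.insert i 0)
    else List.replicate count.toNat (-1)              -- [-1] * count

def solution (count : Int) (votes : List (Int × Int)) : List Int :=
  let g := buildG votes
  let vs := votes.map (fun p => PySem.Set.ofList [p.1, p.2])   -- votes = list(map(set, votes))
  outerA count g vs (2 * votes.length + 2) (PySem.List.pyRange 1 (count + 1) 1) PySem.Dict.empty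

-- ===== PORT B =====
-- phase 1 inner loop: 'for x, y in votes' for one frontier literal l, growing (seen, new)
def scanVotes (σ : PySem.Dict Int Int) (l : Int) (votes : List (Int × Int))
    (acc : List Int × List Int) : List Int × List Int :=
  votes.foldl (fun acc q =>
    if q.1 = l ∨ q.2 = l then
      let c := if q.1 = l then q.2 else q.1
      if c ≠ l ∧ σ.getD |c| (-1) = -1 ∧ (-c) ∉ acc.1 then (acc.1 ++ [-c], acc.2 ++ [-c]) else acc
    else acc) acc

-- one round of the while-loop: 'for l in frontier: …', from (seen, [])
def phase1Round (votes : List (Int × Int)) (σ : PySem.Dict Int Int)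
    (frontier seen : List Int) : List Int × List Int :=
  frontier.foldl (fun acc l => scanVotes σ l votes acc) (seen, [])

-- 'while frontier:'; fuel only bounds the number of rounds (each round but the last two
-- strictly grows seen, whose distinct elements come from a universe of size 2*len(votes)+1)
def phase1 (votes : List (Int × Int)) (σ : PySem.Dict Int Int) :
    Nat → List Int → List Int → List Int
  | _, seen, [] => seen
  | 0, seen, _ :: _ => seen
  | f + 1, seen, l :: fr =>
    let p := phase1Round votes σ (l :: fr) seen
    phase1 votes σ f p.1 p.2

-- phase 2 inner loop over the clauses for one falsified literal l (none = early 'return False')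
def scanP2 (σ : PySem.Dict Int Int) (l : Int) :
    List (Int × Int) → List Int → Option (List Int)
  | [], forced => some forced
  | q :: rest, forced =>
    if q.1 = l ∨ q.2 = l then
      let c := if q.1 = l then q.2 else q.1
      if c = l then none
      else if σ.getD |c| (-1) ≠ -1 then
        if σ.getD |c| (-1) ≠ (if c > 0 then (1 : Int) else 0) then none
        else scanP2 σ l rest forced
      else if c ∉ forced then scanP2 σ l rest (forced ++ [c])
      else scanP2 σ l rest forced
    else scanP2 σ l rest forced

-- phase 2 outer loop: 'for l in seen'
def phase2 (σ : PySem.Dict Int Int) (votes : List (Int × Int)) :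
    List Int → List Int → Option (List Int)
  | [], forced => some forced
  | l :: rest, forced =>
    match scanP2 σ l votes forced with
    | none => none
    | some f' => phase2 σ votes rest f'

def checkB (votes : List (Int × Int)) (σ : PySem.Dict Int Int) (s : Int) : Bool :=
  match phase2 σ votes (phase1 votes σ (2 * votes.length + 2) [s] [s]) [] with
  | none => false
  | some forced => forced.all (fun c => decide ((-c) ∉ forced))

def outerB (count : Int) (votes : List (Int × Int)) : List Int → PySem.Dict Int Int → List Int
  | [], law => law.values
  | i :: rest, law =>
    if checkB votes law (-i) then outerB count votes rest (law.insert i 1)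
    else if checkB votes law i then outerB count votes rest (law.insert i 0)
    else List.replicate count.toNat (-1)

def solution_alt (count : Int) (votes : List (Int × Int)) : List Int :=
  outerB count votes (PySem.List.pyRange 1 (count + 1) 1) PySem.Dict.empty

-- ===== PRECONDITION & SPEC =====
-- Pre_ excludes votes containing the literal 0, which lies outside the 2-SAT domain (0 has no
-- negation, +0 and -0 coincide): A's (abs,sign) bucketing silently never propagates consequences
-- of forcing variable 0, while B's literal-keyed reachability does.
def Pre_solution (count : Int) (votes : List (Int × Int)) : Prop :=
  ∀ p ∈ votes, p.1 ≠ 0 ∧ p.2 ≠ 0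
instance (count : Int) (votes : List (Int × Int)) : Decidable (Pre_solution count votes) := by
  unfold Pre_solution; infer_instance

def pvWitness_solution : Int × (List (Int × Int)) := (2, [(1, -2), (2, 1)])

def Spec_solution (count : Int) (votes : List (Int × Int)) (out : List Int) : Prop := out = solution_alt count votes
instance (count : Int) (votes : List (Int × Int)) (out : List Int) : Decidable (Spec_solution count votes out) := by
  unfold Spec_solution; infer_instance

-- ===== CLAIM (what is proved, stated in full; the proofs are below) =====
def Claim_equal_solution : Prop := ∀ (count : Int) (votes : List (Int × Int)), Dom_solution count votes → Pre_solution count votes → Spec_solution count votes (solution count votes)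

-- ===== LEMMAS AND PROOFS =====

-- the literal a call setting(pos, enact, ·) treats as falsified (A computes it as 'curr')
def litOf (pos : Int) (enact : Bool) : Int := if enact then -pos else pos

-- the int A stores for an enacted literal: 1 if c > 0 else 0
def sgn01 (c : Int) : Int := if c > 0 then 1 else 0

-- EdgeP votes l c: some vote contains the literal l and its other literal is c
def EdgeP (votes : List (Int × Int)) (l c : Int) : Prop :=
  ∃ q ∈ votes, (q.1 = l ∨ q.2 = l) ∧ c = (if q.1 = l then q.2 else q.1)

-- the falsified literals reachable from s when the enacted laws are σ
inductive ReachP (votes : List (Int × Int)) (σ : PySem.Dict Int Int) (s : Int) : Int → Prop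
  | base : ReachP votes σ s s
  | step {l c : Int} : ReachP votes σ s l → EdgeP votes l c → c ≠ l →
      σ.getD |c| (-1) = -1 → ReachP votes σ s (-c)

-- literals forced true by the propagation from s
def ForcedP (votes : List (Int × Int)) (σ : PySem.Dict Int Int) (s c : Int) : Prop :=
  ∃ l, ReachP votes σ s l ∧ EdgeP votes l c ∧ c ≠ l ∧ σ.getD |c| (-1) = -1

-- the propagation from s fails: a clause gets wiped out, an enacted law is contradicted,
-- or some variable is forced both ways
def FailP (votes : List (Int × Int)) (σ : PySem.Dict Int Int) (s : Int) : Prop :=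
  (∃ l, ReachP votes σ s l ∧ (l, l) ∈ votes) ∨
  (∃ l c, ReachP votes σ s l ∧ EdgeP votes l c ∧ σ.getD |c| (-1) ≠ -1 ∧ σ.getD |c| (-1) ≠ sgn01 c) ∨
  (∃ c, ForcedP votes σ s c ∧ ForcedP votes σ s (-c))

def NZ (votes : List (Int × Int)) : Prop := ∀ q ∈ votes, q.1 ≠ 0 ∧ q.2 ≠ 0

-- dict-extension facts for A's tmp
def Mono (t t' : PySem.Dict Int Int) : Prop :=
  ∀ v : Int, t.getD v (-1) ≠ -1 → t'.getD v (-1) = t.getD v (-1)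

def Jinv (votes : List (Int × Int)) (σ : PySem.Dict Int Int) (s : Int)
    (t : PySem.Dict Int Int) : Prop :=
  ∀ v : Int, t.getD v (-1) = σ.getD v (-1) ∨
    (σ.getD v (-1) = -1 ∧ ∃ c, ForcedP votes σ s c ∧ |c| = v ∧ t.getD v (-1) = sgn01 c)

def DoneL (votes : List (Int × Int)) (t : PySem.Dict Int Int) (l : Int) : Prop :=
  ∀ c, EdgeP votes l c → c ≠ l ∧ t.getD |c| (-1) = sgn01 c

def NewDone (votes : List (Int × Int)) (t t' : PySem.Dict Int Int) : Prop :=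
  ∀ v : Int, t.getD v (-1) = -1 → t'.getD v (-1) ≠ -1 →
    ∃ c, |c| = v ∧ t'.getD v (-1) = sgn01 c ∧ DoneL votes t' (-c)

-- free (unassigned) variables of the vote list, bounding A's recursion depth
def varsOf (votes : List (Int × Int)) : Finset Int :=
  (votes.flatMap (fun q => [|q.1|, |q.2|])).toFinset

def nfree (t : PySem.Dict Int Int) (votes : List (Int × Int)) : Nat :=
  ((varsOf votes).filter (fun v => t.getD v (-1) = -1)).card

-- ---------- small facts ----------

lemma sgn01_ne_neg_one (c : Int) : sgn01 c ≠ -1 := by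
  unfold sgn01; split_ifs <;> omega

lemma sgn01_neg_ne (c : Int) (hc : c ≠ 0) : sgn01 (-c) ≠ sgn01 c := by
  unfold sgn01; split_ifs <;> omega

lemma eq_of_abs_sgn {d c : Int} (h1 : |d| = |c|) (h2 : sgn01 d = sgn01 c) (hc : c ≠ 0) : d = c := by
  rcases abs_eq_abs.mp h1 with h | h
  · exact h
  · exfalso; subst h; exact sgn01_neg_ne c hc h2

lemma litOf_abs (c : Int) (hc : c ≠ 0) : litOf |c| (decide (c > 0)) = -c := by
  unfold litOf
  rcases lt_or_gt_of_ne hc with h | h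
  · rw [decide_eq_false (by omega : ¬ c > 0), if_neg (by simp), abs_of_neg h]
  · rw [decide_eq_true h, if_pos rfl, abs_of_pos h]

lemma Mono.refl (t : PySem.Dict Int Int) : Mono t t := fun _ _ => rfl

lemma Mono.comp {t t' t'' : PySem.Dict Int Int} (h1 : Mono t t') (h2 : Mono t' t'') :
    Mono t t'' := by
  intro v hv
  rw [h2 v (by rw [h1 v hv]; exact hv), h1 v hv]

lemma DoneL_mono {votes : List (Int × Int)} {t t' : PySem.Dict Int Int} {l : Int}
    (hd : DoneL votes t l) (hm : Mono t t') : DoneL votes t' l := by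
  intro c hc
  obtain ⟨h1, h2⟩ := hd c hc
  exact ⟨h1, by rw [hm |c| (by rw [h2]; exact sgn01_ne_neg_one c), h2]⟩

lemma NewDone.refl (votes : List (Int × Int)) (t : PySem.Dict Int Int) : NewDone votes t t :=
  fun _ h1 h2 => absurd h1 h2

lemma NewDone.comp {votes : List (Int × Int)} {t t' t'' : PySem.Dict Int Int}
    (hn1 : NewDone votes t t') (hn2 : NewDone votes t' t'') (hm2 : Mono t' t'') :
    NewDone votes t t'' := by
  intro v h1 h2
  by_cases h : t'.getD v (-1) = -1
  · exact hn2 v h h2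
  · obtain ⟨c, hc1, hc2, hc3⟩ := hn1 v h1 h
    exact ⟨c, hc1, by rw [hm2 v h, hc2], DoneL_mono hc3 hm2⟩

lemma nfree_mono {t t' : PySem.Dict Int Int} {votes : List (Int × Int)}
    (hm : Mono t t') : nfree t' votes ≤ nfree t votes := by
  apply Finset.card_le_card
  intro v hv
  simp only [Finset.mem_filter] at hv ⊢
  refine ⟨hv.1, ?_⟩
  by_contra h
  exact (by rw [hm v h] at hv; exact h hv.2)

lemma mono_insert_free {t : PySem.Dict Int Int} {v w : Int} (hv : t.getD v (-1) = -1) :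
    Mono t (t.insert v w) := by
  intro u hu
  rw [PySem.Dict.getD_insert]
  split_ifs with h
  · subst h; exact absurd hv hu
  · rfl

lemma nfree_insert_lt {t : PySem.Dict Int Int} {votes : List (Int × Int)} {v w : Int}
    (hmem : v ∈ varsOf votes) (hfree : t.getD v (-1) = -1) (hw : w ≠ -1) :
    nfree (t.insert v w) votes < nfree t votes := by
  apply Finset.card_lt_card
  constructor
  · intro u hu
    simp only [Finset.mem_filter, PySem.Dict.getD_insert] at hu ⊢
    rcases hu with ⟨h1, h2⟩
    split_ifs at h2 with h
    · exact absurd h2 hw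
    · exact ⟨h1, h2⟩
  · intro hsub
    have hv : v ∈ (varsOf votes).filter (fun u => t.getD u (-1) = -1) := by
      simp only [Finset.mem_filter]; exact ⟨hmem, hfree⟩
    have := hsub hv
    simp only [Finset.mem_filter, PySem.Dict.getD_insert] at this
    exact hw this.2

-- ---------- selG / buildG bridge ----------

def selG (g : PySem.Dict Int (List Int × List Int)) (m : Int) : List Int :=
  if m > 0 then (g.getD |m| ([], [])).2 else (g.getD |m| ([], [])).1

lemma selG_gStep (idx l : Int) (g : PySem.Dict Int (List Int × List Int)) (m : Int) (hm : m ≠ 0) :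
    selG (gStep idx l g) m = if m = l then selG g m ++ [idx] else selG g m := by
  simp only [selG, gStep, PySem.Dict.getD_insert]
  by_cases habs : |m| = |l|
  · rcases abs_eq_abs.mp habs with h | h <;> subst h <;> split_ifs <;> simp_all <;> omega
  · have hml : m ≠ l := fun h => habs (by rw [h])
    simp [habs, hml]

lemma mem_selG_fold (m : Int) (hm : m ≠ 0) : ∀ (L : List (Int × (Int × Int))),
    ∀ (g₀ : PySem.Dict Int (List Int × List Int)) (p : Int),
      p ∈ selG (L.foldl (fun g e => gStep e.1 e.2.2 (gStep e.1 e.2.1 g)) g₀) m ↔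
        p ∈ selG g₀ m ∨ ∃ e ∈ L, p = e.1 ∧ (e.2.1 = m ∨ e.2.2 = m) := by
  intro L
  induction L with
  | nil => intro g₀ p; simp
  | cons e L ih =>
    intro g₀ p
    rw [List.foldl_cons, ih]
    rw [selG_gStep _ _ _ _ hm]
    constructor
    · rintro (h | h)
      · split_ifs at h with h2
        · rcases List.mem_append.mp h with h3 | h3
          · rw [selG_gStep _ _ _ _ hm] at h3
            split_ifs at h3 with h4
            · rcases List.mem_append.mp h3 with h5 | h5
              · exact Or.inl h5
              · simp at h5; exact Or.inr ⟨e, List.mem_cons_self, h5, Or.inl h4.symm⟩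
            · exact Or.inl h3
          · simp at h3; exact Or.inr ⟨e, List.mem_cons_self, h3, Or.inr h2.symm⟩
        · rw [selG_gStep _ _ _ _ hm] at h
          split_ifs at h with h4
          · rcases List.mem_append.mp h with h5 | h5
            · exact Or.inl h5
            · simp at h5; exact Or.inr ⟨e, List.mem_cons_self, h5, Or.inl h4.symm⟩
          · exact Or.inl h
      · obtain ⟨e', he', h1, h2⟩ := h
        exact Or.inr ⟨e', List.mem_cons_of_mem _ he', h1, h2⟩
    · rintro (h | h)
      · left
        rw [selG_gStep _ _ _ _ hm]
        split_ifs with h2 h3 h3 <;> simp [h]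
      · obtain ⟨e', he', h1, h2⟩ := h
        rcases List.mem_cons.mp he' with he | he
        · subst he
          left
          rw [selG_gStep _ _ _ _ hm]
          rcases h2 with h2 | h2
          · rw [if_pos h2.symm]; split_ifs <;> simp [h1]
          · rw [if_pos h2.symm]; simp [h1]
        · exact Or.inr ⟨e', he, h1, h2⟩

lemma mem_enumerate_iff (votes : List (Int×Int)) (e : Int × (Int × Int)) :
    e ∈ PySem.List.enumerate votes 0 ↔ ∃ k : Nat, ∃ hk : k < votes.length, e = ((k:Int), votes.get ⟨k, hk⟩) := by
  rw [PySem.List.enumerate_eq_zipIdx_map]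
  simp only [List.mem_map]
  constructor
  · rintro ⟨⟨q, i⟩, hq, rfl⟩
    rw [List.mk_mem_zipIdx_iff_getElem?, List.getElem?_eq_some_iff] at hq
    obtain ⟨hi, hqi⟩ := hq
    exact ⟨i, hi, by simp [hqi]⟩
  · rintro ⟨k, hk, rfl⟩
    refine ⟨(votes.get ⟨k, hk⟩, k), ?_, by simp⟩
    rw [List.mk_mem_zipIdx_iff_getElem?, List.getElem?_eq_some_iff]
    exact ⟨hk, by simp⟩

lemma mem_selG_iff (votes : List (Int × Int)) (m : Int) (hm : m ≠ 0) (p : Int) :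
    p ∈ selG (buildG votes) m ↔
      ∃ k : Nat, ∃ hk : k < votes.length, p = (k : Int) ∧
        ((votes.get ⟨k, hk⟩).1 = m ∨ (votes.get ⟨k, hk⟩).2 = m) := by
  unfold buildG
  rw [mem_selG_fold m hm]
  have hempty : p ∈ selG PySem.Dict.empty m ↔ False := by
    unfold selG; rw [PySem.Dict.getD_empty]; split_ifs <;> simp
  rw [hempty]
  simp only [false_or]
  constructor
  · rintro ⟨e, he, h1, h2⟩
    rw [mem_enumerate_iff] at he
    obtain ⟨k, hk, rfl⟩ := he
    exact ⟨k, hk, h1, h2⟩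
  · rintro ⟨k, hk, h1, h2⟩
    refine ⟨((k:Int), votes.get ⟨k, hk⟩), ?_, h1, h2⟩
    rw [mem_enumerate_iff]
    exact ⟨k, hk, rfl⟩

lemma selG_sound (votes : List (Int × Int)) (m : Int) (hm : m ≠ 0) (p : Int)
    (hp : p ∈ selG (buildG votes) m) :
    ∃ q, PySem.List.pyGet? votes p = some q ∧ (q.1 = m ∨ q.2 = m) := by
  rw [mem_selG_iff votes m hm] at hp
  obtain ⟨k, hk, rfl, h2⟩ := hp
  refine ⟨votes.get ⟨k, hk⟩, ?_, h2⟩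
  rw [PySem.List.pyGet?_natCast]
  simp [hk]

lemma selG_complete (votes : List (Int × Int)) (m : Int) (hm : m ≠ 0) (q : Int × Int)
    (hq : q ∈ votes) (hlit : q.1 = m ∨ q.2 = m) :
    ∃ p, p ∈ selG (buildG votes) m ∧ PySem.List.pyGet? votes p = some q := by
  obtain ⟨k, hqk⟩ := List.mem_iff_get.mp hq
  refine ⟨((k : Nat) : Int), ?_, ?_⟩
  · rw [mem_selG_iff votes m hm]
    exact ⟨k, k.isLt, rfl, by
      rw [show votes.get ⟨(k : Nat), k.isLt⟩ = votes.get k from rfl, hqk]; exact hlit⟩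
  · rw [PySem.List.pyGet?_natCast, List.getElem?_eq_getElem k.isLt]
    exact congrArg some (by rw [← hqk]; rfl)

lemma pyGet?_map {α β : Type} (f : α → β) (xs : List α) (i : Int) :
    PySem.List.pyGet? (xs.map f) i = (PySem.List.pyGet? xs i).map f := by
  simp [PySem.List.pyGet?, PySem.List.pyIdx?]

-- votes[person] - {curr} as A computes it, in closed form
lemma setdiff_pair (x y curr : Int) :
    PySem.Set.diff (PySem.Set.ofList [x, y]) [curr] =
      if x = curr then (if y = curr then [] else [y])
      else if y = curr ∨ y = x then [x] else [x, y] := by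
  by_cases hx : x = curr <;> by_cases hy : y = curr <;> by_cases hxy : y = x <;>
    simp_all [PySem.Set.ofList, PySem.Set.add, PySem.Set.diff, PySem.Set.contains, List.foldl]

-- ---------- A-side main lemma ----------

-- conclusions of a successful / failed call of setting() on falsified literal `lit`
def PostA (votes : List (Int × Int)) (σ : PySem.Dict Int Int) (s lit : Int)
    (tmp : PySem.Dict Int Int) (r : Bool × PySem.Dict Int Int) : Prop :=
  (r.1 = false → FailP votes σ s) ∧
  (r.1 = true → Mono tmp r.2 ∧ Jinv votes σ s r.2 ∧ NewDone votes tmp r.2 ∧ DoneL votes r.2 lit)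

lemma var_mem (votes : List (Int × Int)) (q : Int × Int) (hq : q ∈ votes) :
    |q.1| ∈ varsOf votes ∧ |q.2| ∈ varsOf votes := by
  constructor <;> (simp only [varsOf, List.mem_toFinset, List.mem_flatMap]; exact ⟨q, hq, by simp⟩)

lemma settingA_succ (g : PySem.Dict Int (List Int × List Int)) (vs : List (PySem.Set Int))
    (f : Nat) (pos : Int) (enact : Bool) (tmp : PySem.Dict Int Int) (hpos : 0 < pos) :
    settingA g vs (f + 1) pos enact tmp =
      settingForA vs (fun pos' enact' tmp' => settingA g vs f pos' enact' tmp')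
        (litOf pos enact) (selG g (litOf pos enact)) tmp := by
  rw [settingA]
  cases enact with
  | true =>
    simp only [litOf, Bool.not_true, Bool.false_eq_true, if_false, selG, reduceIte]
    rw [if_neg (by omega : ¬ -pos > 0), abs_neg, abs_of_pos hpos]
  | false =>
    simp only [litOf, Bool.not_false, selG, reduceIte, Bool.false_eq_true, if_false]
    rw [if_pos hpos, abs_of_pos hpos]

-- conclusions of the person loop on `rest` starting from a given tmp
def LoopPost (votes : List (Int × Int)) (σ : PySem.Dict Int Int) (s curr : Int)
    (rest : List Int) (tmp : PySem.Dict Int Int) (r : Bool × PySem.Dict Int Int) : Prop :=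
  (r.1 = false → FailP votes σ s) ∧
  (r.1 = true → Mono tmp r.2 ∧ Jinv votes σ s r.2 ∧ NewDone votes tmp r.2 ∧
    ∀ p ∈ rest, ∀ q : Int × Int, PySem.List.pyGet? votes p = some q → (q.1 = curr ∨ q.2 = curr) →
      ((if q.1 = curr then q.2 else q.1) ≠ curr ∧
       r.2.getD |if q.1 = curr then q.2 else q.1| (-1) = sgn01 (if q.1 = curr then q.2 else q.1)))

-- processing one forced literal c, then the rest of the person list
lemma stepA (votes : List (Int × Int)) (σ : PySem.Dict Int Int) (s : Int)
    (f : Nat) (curr : Int) (hcR : ReachP votes σ s curr)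
    (rest : List Int) (c : Int) (hc0 : c ≠ 0) (hne : c ≠ curr)
    (hedge : EdgeP votes curr c) (hvmem : |c| ∈ varsOf votes)
    (tmp : PySem.Dict Int Int) (hJ : Jinv votes σ s tmp) (hn : nfree tmp votes ≤ f)
    (IH : ∀ (pos' : Int) (enact' : Bool) (tmp' : PySem.Dict Int Int),
      0 < pos' → ReachP votes σ s (litOf pos' enact') → Jinv votes σ s tmp' →
      nfree tmp' votes + 1 ≤ f →
      PostA votes σ s (litOf pos' enact') tmp'
        (settingA (buildG votes) (votes.map (fun p => PySem.Set.ofList [p.1, p.2])) f pos' enact' tmp'))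
    (ihrest : ∀ tmp₂ : PySem.Dict Int Int, Jinv votes σ s tmp₂ → nfree tmp₂ votes ≤ f →
      LoopPost votes σ s curr rest tmp₂
        (settingForA (votes.map (fun p => PySem.Set.ofList [p.1, p.2]))
          (fun pos' enact' tmp' => settingA (buildG votes) (votes.map (fun p => PySem.Set.ofList [p.1, p.2])) f pos' enact' tmp')
          curr rest tmp₂)) :
    (let R := if tmp.getD |c| (-1) = -1 then
        (let r := settingA (buildG votes) (votes.map (fun p => PySem.Set.ofList [p.1, p.2])) f
          |c| (decide (c > 0)) (tmp.insert |c| (if c > 0 then (1 : Int) else 0))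
        if r.1 then
          settingForA (votes.map (fun p => PySem.Set.ofList [p.1, p.2]))
            (fun pos' enact' tmp' => settingA (buildG votes) (votes.map (fun p => PySem.Set.ofList [p.1, p.2])) f pos' enact' tmp')
            curr rest r.2
        else (false, r.2))
      else if tmp.getD |c| (-1) ≠ (if c > 0 then (1 : Int) else 0) then (false, tmp)
      else
        settingForA (votes.map (fun p => PySem.Set.ofList [p.1, p.2]))
          (fun pos' enact' tmp' => settingA (buildG votes) (votes.map (fun p => PySem.Set.ofList [p.1, p.2])) f pos' enact' tmp')
          curr rest tmp
     LoopPost votes σ s curr rest tmp R ∧ (R.1 = true → R.2.getD |c| (-1) = sgn01 c)) := by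
  dsimp only
  by_cases hfree : tmp.getD |c| (-1) = -1
  · rw [if_pos hfree]
    have hσfree : σ.getD |c| (-1) = -1 := by
      rcases hJ |c| with hh | hh
      · rw [← hh]; exact hfree
      · exfalso; obtain ⟨_, d, _, _, hvd⟩ := hh; rw [hvd] at hfree; exact sgn01_ne_neg_one d hfree
    have hforced : ForcedP votes σ s c := ⟨curr, hcR, hedge, hne, hσfree⟩
    have hreach' : ReachP votes σ s (-c) := ReachP.step hcR hedge hne hσfree
    set tmp' := tmp.insert |c| (if c > 0 then (1 : Int) else 0) with htmp'
    have htmp'c : tmp'.getD |c| (-1) = sgn01 c := by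
      rw [htmp', PySem.Dict.getD_insert, if_pos rfl]; rfl
    have htmp'ne : ∀ v : Int, v ≠ |c| → tmp'.getD v (-1) = tmp.getD v (-1) := by
      intro v hv; rw [htmp', PySem.Dict.getD_insert, if_neg hv]
    have hJ' : Jinv votes σ s tmp' := by
      intro v
      by_cases hv : v = |c|
      · subst hv; exact Or.inr ⟨hσfree, c, hforced, rfl, htmp'c⟩
      · rw [htmp'ne v hv]; exact hJ v
    have hnf' : nfree tmp' votes + 1 ≤ f := by
      have h2 := nfree_insert_lt (t := tmp) (votes := votes) hvmem hfree
        (w := if c > 0 then (1 : Int) else 0) (by split_ifs <;> omega)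
      rw [← htmp'] at h2
      omega
    have habs0 : (0 : Int) < |c| := by positivity
    have hIH := IH |c| (decide (c > 0)) tmp' habs0 (by rwa [litOf_abs c hc0]) hJ' hnf'
    rw [litOf_abs c hc0] at hIH
    set r0 := settingA (buildG votes) (votes.map (fun p => PySem.Set.ofList [p.1, p.2])) f
      |c| (decide (c > 0)) tmp' with hr0
    obtain ⟨hIHf, hIHt⟩ := hIH
    cases hr01 : r0.1 with
    | false =>
      rw [if_neg (by simp : ¬ ((false : Bool) = true))]
      exact ⟨⟨fun _ => hIHf hr01, fun h => by simp at h⟩, fun h => by simp at h⟩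
    | true =>
      rw [if_pos (rfl : (true : Bool) = true)]
      obtain ⟨hM0, hJ0, hND0, hDL0⟩ := hIHt hr01
      have hMtmp' : Mono tmp tmp' := mono_insert_free hfree
      have hn0 : nfree r0.2 votes ≤ f := le_trans (nfree_mono hM0) (by omega)
      obtain ⟨ihf, iht⟩ := ihrest r0.2 hJ0 hn0
      refine ⟨⟨ihf, fun hsucc => ?_⟩, fun hsucc => ?_⟩
      · obtain ⟨ihM, ihJ, ihND, ihPost⟩ := iht hsucc
        set rf := settingForA (votes.map (fun p => PySem.Set.ofList [p.1, p.2]))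
          (fun pos' enact' tmp' => settingA (buildG votes) (votes.map (fun p => PySem.Set.ofList [p.1, p.2])) f pos' enact' tmp')
          curr rest r0.2 with hrf
        have hMall : Mono tmp rf.2 := (hMtmp'.comp hM0).comp ihM
        have hr0c : r0.2.getD |c| (-1) = sgn01 c := by
          rw [hM0 |c| (by rw [htmp'c]; exact sgn01_ne_neg_one c), htmp'c]
        have hrfc : rf.2.getD |c| (-1) = sgn01 c := by
          rw [ihM |c| (by rw [hr0c]; exact sgn01_ne_neg_one c), hr0c]
        refine ⟨hMall, ihJ, ?_, ihPost⟩
        intro v hvfree hvdef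
        by_cases hv : v = |c|
        · subst hv
          exact ⟨c, rfl, hrfc, DoneL_mono hDL0 ihM⟩
        · have : tmp'.getD v (-1) = -1 := by rw [htmp'ne v hv]; exact hvfree
          exact (NewDone.comp hND0 ihND ihM) v this hvdef
      · obtain ⟨ihM, _, _, _⟩ := iht hsucc
        have hr0c : r0.2.getD |c| (-1) = sgn01 c := by
          rw [hM0 |c| (by rw [htmp'c]; exact sgn01_ne_neg_one c), htmp'c]
        rw [ihM |c| (by rw [hr0c]; exact sgn01_ne_neg_one c), hr0c]
  · rw [if_neg hfree]
    by_cases hval : tmp.getD |c| (-1) ≠ (if c > 0 then (1 : Int) else 0)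
    · rw [if_pos hval]
      have hfail : FailP votes σ s := by
        rcases hJ |c| with hh | hh
        · exact Or.inr (Or.inl ⟨curr, c, hcR, hedge, by rw [← hh]; exact hfree,
            by rw [← hh]; exact hval⟩)
        · obtain ⟨hσfree, d, hFd, habs, hvd⟩ := hh
          have hdc : d = -c := by
            rcases abs_eq_abs.mp habs with h | h
            · exfalso; subst h; rw [hvd] at hval; exact hval rfl
            · exact h
          exact Or.inr (Or.inr ⟨c, ⟨curr, hcR, hedge, hne, hσfree⟩, by rwa [hdc] at hFd⟩)
      exact ⟨⟨fun _ => hfail, fun h => by simp at h⟩, fun h => by simp at h⟩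
    · rw [if_neg hval, not_not] at *
      obtain ⟨ihf, iht⟩ := ihrest tmp hJ hn
      refine ⟨⟨ihf, iht⟩, fun hsucc => ?_⟩
      obtain ⟨ihM, _, _, _⟩ := iht hsucc
      rw [ihM |c| (by rw [hval]; exact sgn01_ne_neg_one c), hval]
      rfl

lemma loopA (votes : List (Int × Int)) (σ : PySem.Dict Int Int) (s : Int) (hNZ : NZ votes)
    (f : Nat) (curr : Int) (hcR : ReachP votes σ s curr)
    (IH : ∀ (pos' : Int) (enact' : Bool) (tmp' : PySem.Dict Int Int),
      0 < pos' → ReachP votes σ s (litOf pos' enact') → Jinv votes σ s tmp' →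
      nfree tmp' votes + 1 ≤ f →
      PostA votes σ s (litOf pos' enact') tmp'
        (settingA (buildG votes) (votes.map (fun p => PySem.Set.ofList [p.1, p.2])) f pos' enact' tmp')) :
    ∀ (persons : List Int) (tmp : PySem.Dict Int Int),
      (∀ p ∈ persons, ∃ q, PySem.List.pyGet? votes p = some q ∧ (q.1 = curr ∨ q.2 = curr)) →
      Jinv votes σ s tmp → nfree tmp votes ≤ f →
      LoopPost votes σ s curr persons tmp
        (settingForA (votes.map (fun p => PySem.Set.ofList [p.1, p.2]))
          (fun pos' enact' tmp' => settingA (buildG votes) (votes.map (fun p => PySem.Set.ofList [p.1, p.2])) f pos' enact' tmp')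
          curr persons tmp) := by
  intro persons
  induction persons with
  | nil =>
    intro tmp hp hJ hn
    rw [settingForA]
    exact ⟨fun h => by simp at h, fun _ => ⟨Mono.refl tmp, hJ, NewDone.refl votes tmp, by simp⟩⟩
  | cons p rest ih =>
    intro tmp hp hJ hn
    obtain ⟨q, hq, hlit⟩ := hp p List.mem_cons_self
    have hqv : q ∈ votes := PySem.List.mem_of_pyGet?_eq_some votes hq
    have hq0 := hNZ q hqv
    rw [settingForA, pyGet?_map, hq]
    simp only [Option.map_some]
    rw [setdiff_pair]
    have hrest : ∀ p' ∈ rest, ∃ q', PySem.List.pyGet? votes p' = some q' ∧ (q'.1 = curr ∨ q'.2 = curr) :=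
      fun p' hp' => hp p' (List.mem_cons_of_mem _ hp')
    by_cases h1 : q.1 = curr
    · by_cases h2 : q.2 = curr
      · -- clause wiped out
        rw [if_pos h1, if_pos h2]
        refine ⟨fun _ => Or.inl ⟨curr, hcR, ?_⟩, fun h => by simp at h⟩
        have : q = (curr, curr) := Prod.ext h1 h2
        rwa [← this]
      · rw [if_pos h1, if_neg h2]
        have hc : (if q.1 = curr then q.2 else q.1) = q.2 := if_pos h1
        have hedge : EdgeP votes curr q.2 := ⟨q, hqv, hlit, hc.symm⟩
        have hstep := stepA votes σ s f curr hcR rest q.2 hq0.2 h2 hedge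
          (var_mem votes q hqv).2 tmp hJ hn IH
          (fun tmp₂ hJ₂ hn₂ => ih tmp₂ hrest hJ₂ hn₂)
        dsimp only at hstep
        refine ⟨hstep.1.1, fun hsucc => ?_⟩
        obtain ⟨hM, hJr, hND, hPost⟩ := hstep.1.2 hsucc
        refine ⟨hM, hJr, hND, ?_⟩
        intro p' hp' q' hq' hlit'
        rcases List.mem_cons.mp hp' with rfl | hp'
        · have : q' = q := by rw [hq'] at hq; exact Option.some.inj hq
          subst this
          rw [hc]
          exact ⟨h2, hstep.2 hsucc⟩
        · exact hPost p' hp' q' hq' hlit'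
    · have h2 : q.2 = curr := by rcases hlit with h | h; exact absurd h h1; exact h
      rw [if_neg h1, if_pos (Or.inl h2)]
      have hc : (if q.1 = curr then q.2 else q.1) = q.1 := if_neg h1
      have hedge : EdgeP votes curr q.1 := ⟨q, hqv, hlit, hc.symm⟩
      have hstep := stepA votes σ s f curr hcR rest q.1 hq0.1 h1 hedge
        (var_mem votes q hqv).1 tmp hJ hn IH
        (fun tmp₂ hJ₂ hn₂ => ih tmp₂ hrest hJ₂ hn₂)
      dsimp only at hstep
      refine ⟨hstep.1.1, fun hsucc => ?_⟩
      obtain ⟨hM, hJr, hND, hPost⟩ := hstep.1.2 hsucc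
      refine ⟨hM, hJr, hND, ?_⟩
      intro p' hp' q' hq' hlit'
      rcases List.mem_cons.mp hp' with rfl | hp'
      · have : q' = q := by rw [hq'] at hq; exact Option.some.inj hq
        subst this
        rw [hc]
        exact ⟨h1, hstep.2 hsucc⟩
      · exact hPost p' hp' q' hq' hlit'

lemma mainA (votes : List (Int × Int)) (σ : PySem.Dict Int Int) (s : Int) (hNZ : NZ votes) :
    ∀ (f : Nat) (pos : Int) (enact : Bool) (tmp : PySem.Dict Int Int),
      0 < pos →
      ReachP votes σ s (litOf pos enact) →
      Jinv votes σ s tmp →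
      nfree tmp votes + 1 ≤ f →
      PostA votes σ s (litOf pos enact) tmp
        (settingA (buildG votes) (votes.map (fun p => PySem.Set.ofList [p.1, p.2])) f pos enact tmp) := by
  intro f
  induction f with
  | zero => intro pos enact tmp _ _ _ h; omega
  | succ f ihf =>
    intro pos enact tmp hpos hR hJ hn
    rw [settingA_succ _ _ _ _ _ _ hpos]
    have hcurr0 : litOf pos enact ≠ 0 := by
      unfold litOf; split_ifs <;> omega
    have hp : ∀ p ∈ selG (buildG votes) (litOf pos enact), ∃ q,
        PySem.List.pyGet? votes p = some q ∧ (q.1 = litOf pos enact ∨ q.2 = litOf pos enact) :=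
      fun p hp => selG_sound votes _ hcurr0 p hp
    have hloop := loopA votes σ s hNZ f (litOf pos enact) hR ihf
      (selG (buildG votes) (litOf pos enact)) tmp hp hJ (by omega)
    refine ⟨hloop.1, fun hsucc => ?_⟩
    obtain ⟨hM, hJr, hND, hPost⟩ := hloop.2 hsucc
    refine ⟨hM, hJr, hND, ?_⟩
    -- DoneL from the per-person postconditions and bucket completeness
    intro c hc
    obtain ⟨q, hqv, hlitq, hval⟩ := hc
    obtain ⟨p, hpmem, hpq⟩ := selG_complete votes _ hcurr0 q hqv hlitq
    have := hPost p hpmem q hpq hlitq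
    rw [← hval] at this
    exact this

lemma edge_nonzero (votes : List (Int × Int)) (hNZ : NZ votes) {l c : Int}
    (he : EdgeP votes l c) : c ≠ 0 := by
  obtain ⟨q, hq, _, hval⟩ := he
  have := hNZ q hq
  rw [hval]; split_ifs
  · exact this.2
  · exact this.1

lemma notFail_of_post (votes : List (Int × Int)) (σ : PySem.Dict Int Int) (s : Int)
    (hNZ : NZ votes) (T : PySem.Dict Int Int)
    (hM : Mono σ T) (hN : NewDone votes σ T) (hD : DoneL votes T s) :
    ¬ FailP votes σ s := by
  have hRD : ∀ m, ReachP votes σ s m → DoneL votes T m := by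
    intro m hm
    induction hm with
    | base => exact hD
    | step hr he hne hfree ihr =>
      rename_i l c
      obtain ⟨_, hTc⟩ := ihr c he
      obtain ⟨d, habs, hvd, hDLd⟩ := hN |c| hfree (by rw [hTc]; exact sgn01_ne_neg_one c)
      have : d = c := eq_of_abs_sgn habs (by rw [← hvd, hTc]) (edge_nonzero votes hNZ he)
      rwa [this] at hDLd
  intro hfail
  rcases hfail with ⟨l, hl, hq⟩ | ⟨l, c, hl, he, h1, h2⟩ | ⟨c, hc1, hc2⟩
  · exact ((hRD l hl) l ⟨(l, l), hq, Or.inl rfl, by simp⟩).1 rfl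
  · obtain ⟨_, hTc⟩ := (hRD l hl) c he
    rw [hM |c| h1] at hTc
    exact h2 hTc
  · obtain ⟨l1, hl1, he1, hne1, hf1⟩ := hc1
    obtain ⟨l2, hl2, he2, hne2, hf2⟩ := hc2
    obtain ⟨_, hT1⟩ := (hRD l1 hl1) c he1
    obtain ⟨_, hT2⟩ := (hRD l2 hl2) (-c) he2
    rw [abs_neg] at hT2
    rw [hT1] at hT2
    exact sgn01_neg_ne c (edge_nonzero votes hNZ he1) hT2.symm

lemma flatmap_len (votes : List (Int × Int)) :
    (votes.flatMap (fun q => [|q.1|, |q.2|])).length = 2 * votes.length := by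
  induction votes with
  | nil => simp
  | cons q votes ih => simp at ih ⊢; omega

lemma nfree_le (σ : PySem.Dict Int Int) (votes : List (Int × Int)) :
    nfree σ votes ≤ 2 * votes.length := by
  calc nfree σ votes ≤ (varsOf votes).card := Finset.card_filter_le _ _
    _ ≤ (votes.flatMap (fun q => [|q.1|, |q.2|])).length := List.toFinset_card_le _
    _ = 2 * votes.length := flatmap_len votes

lemma settingA_iff (votes : List (Int × Int)) (σ : PySem.Dict Int Int) (hNZ : NZ votes)
    (i : Int) (hi : 1 ≤ i) (enact : Bool) :
    ((settingA (buildG votes) (votes.map (fun p => PySem.Set.ofList [p.1, p.2]))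
        (2 * votes.length + 2) i enact σ).1 = true) ↔ ¬ FailP votes σ (litOf i enact) := by
  have hmain := mainA votes σ (litOf i enact) hNZ (2 * votes.length + 2) i enact σ
    (by omega) ReachP.base (fun v => Or.inl rfl)
    (by have := nfree_le σ votes; omega)
  obtain ⟨hf, ht⟩ := hmain
  constructor
  · intro hsucc
    obtain ⟨hM, _, hND, hDL⟩ := ht hsucc
    exact notFail_of_post votes σ (litOf i enact) hNZ _ hM hND hDL
  · intro hnf
    by_contra h
    exact hnf (hf (Bool.not_eq_true _ ▸ h))

-- ---------- B-side lemmas ----------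

lemma scanVotes_spec (σ : PySem.Dict Int Int) (l : Int) :
    ∀ (V : List (Int × Int)) (acc : List Int × List Int),
      ∃ d, scanVotes σ l V acc = (acc.1 ++ d, acc.2 ++ d) ∧
        (∀ x ∈ d, x ∉ acc.1 ∧ ∃ c, EdgeP V l c ∧ c ≠ l ∧ σ.getD |c| (-1) = -1 ∧ x = -c) ∧
        d.Nodup ∧
        (∀ c, EdgeP V l c → c ≠ l → σ.getD |c| (-1) = -1 → -c ∈ acc.1 ++ d) := by
  intro V
  induction V with
  | nil =>
    intro acc
    exact ⟨[], by simp [scanVotes], by simp, List.nodup_nil, by rintro c ⟨q, hq, _⟩ _ _; simp at hq⟩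
  | cons q V ih =>
    intro acc
    rw [scanVotes, List.foldl_cons]
    by_cases hq : q.1 = l ∨ q.2 = l
    · set c := if q.1 = l then q.2 else q.1 with hc
      by_cases hg : c ≠ l ∧ σ.getD |c| (-1) = -1 ∧ (-c) ∉ acc.1
      · rw [if_pos hq, if_pos hg]
        obtain ⟨d, hd1, hd2, hd3, hd4⟩ := ih (acc.1 ++ [-c], acc.2 ++ [-c])
        refine ⟨-c :: d, ?_, ?_, ?_, ?_⟩
        · rw [← scanVotes, hd1]; simp
        · intro x hx
          rcases List.mem_cons.mp hx with rfl | hx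
          · exact ⟨hg.2.2, c, ⟨q, List.mem_cons_self, hq, hc⟩, hg.1, hg.2.1, rfl⟩
          · obtain ⟨h1, cc, hcc1, hcc2, hcc3, hcc4⟩ := hd2 x hx
            refine ⟨fun hmem => h1 (by simp [hmem]), cc, ?_, hcc2, hcc3, hcc4⟩
            obtain ⟨q', hq', hh⟩ := hcc1
            exact ⟨q', List.mem_cons_of_mem _ hq', hh⟩
        · refine List.nodup_cons.mpr ⟨fun hmem => ?_, hd3⟩
          exact (hd2 _ hmem).1 (by simp)
        · intro cc hcc h1 h2
          obtain ⟨q', hq', hlit, hval⟩ := hcc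
          rcases List.mem_cons.mp hq' with rfl | hq'
          · have : cc = c := by rw [hval, hc]
            subst this; simp
          · have := hd4 cc ⟨q', hq', hlit, hval⟩ h1 h2
            simpa using this
      · rw [if_pos hq, if_neg hg]
        obtain ⟨d, hd1, hd2, hd3, hd4⟩ := ih acc
        refine ⟨d, by rw [← scanVotes, hd1], ?_, hd3, ?_⟩
        · intro x hx
          obtain ⟨h1, cc, hcc1, hcc2, hcc3, hcc4⟩ := hd2 x hx
          obtain ⟨q', hq', hh⟩ := hcc1
          exact ⟨h1, cc, ⟨q', List.mem_cons_of_mem _ hq', hh⟩, hcc2, hcc3, hcc4⟩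
        · intro cc hcc h1 h2
          obtain ⟨q', hq', hlit, hval⟩ := hcc
          rcases List.mem_cons.mp hq' with rfl | hq'
          · -- the guard failed: since c ≠ l and σ-free hold, -c must already be in acc.1
            have hccc : cc = c := hval
            subst hccc
            simp only [not_and, not_not] at hg
            exact List.mem_append.mpr (Or.inl (hg h1 h2))
          · exact hd4 cc ⟨q', hq', hlit, hval⟩ h1 h2
    · rw [if_neg hq]
      obtain ⟨d, hd1, hd2, hd3, hd4⟩ := ih acc
      refine ⟨d, by rw [← scanVotes, hd1], ?_, hd3, ?_⟩
      · intro x hx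
        obtain ⟨h1, cc, hcc1, hcc2, hcc3, hcc4⟩ := hd2 x hx
        obtain ⟨q', hq', hh⟩ := hcc1
        exact ⟨h1, cc, ⟨q', List.mem_cons_of_mem _ hq', hh⟩, hcc2, hcc3, hcc4⟩
      · intro cc hcc h1 h2
        obtain ⟨q', hq', hlit, hval⟩ := hcc
        rcases List.mem_cons.mp hq' with rfl | hq'
        · exact absurd hlit hq
        · exact hd4 cc ⟨q', hq', hlit, hval⟩ h1 h2

lemma phase1Round_fold (votes : List (Int × Int)) (σ : PySem.Dict Int Int) :
    ∀ (frontier : List Int) (acc : List Int × List Int),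
      ∃ d, frontier.foldl (fun acc l => scanVotes σ l votes acc) acc = (acc.1 ++ d, acc.2 ++ d) ∧
        (∀ x ∈ d, x ∉ acc.1 ∧ ∃ l ∈ frontier, ∃ c, EdgeP votes l c ∧ c ≠ l ∧
          σ.getD |c| (-1) = -1 ∧ x = -c) ∧
        d.Nodup ∧
        (∀ l ∈ frontier, ∀ c, EdgeP votes l c → c ≠ l → σ.getD |c| (-1) = -1 → -c ∈ acc.1 ++ d) := by
  intro frontier
  induction frontier with
  | nil => intro acc; exact ⟨[], by simp, by simp, List.nodup_nil, by simp⟩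
  | cons l fr ih =>
    intro acc
    rw [List.foldl_cons]
    obtain ⟨d1, hd1, hs1, hn1, hc1⟩ := scanVotes_spec σ l votes acc
    obtain ⟨d2, hd2, hs2, hn2, hc2⟩ := ih (scanVotes σ l votes acc)
    rw [hd1] at hd2 hs2 hc2
    refine ⟨d1 ++ d2, by rw [hd1, hd2]; simp, ?_, ?_, ?_⟩
    · intro x hx
      rcases List.mem_append.mp hx with hx | hx
      · obtain ⟨h1, c, hc, h2, h3, h4⟩ := hs1 x hx
        exact ⟨h1, l, List.mem_cons_self, c, hc, h2, h3, h4⟩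
      · obtain ⟨h1, l', hl', hrest⟩ := hs2 x hx
        exact ⟨fun hmem => h1 (by simp [hmem]), l', List.mem_cons_of_mem _ hl', hrest⟩
    · refine List.Nodup.append hn1 hn2 ?_
      intro x hx1 hx2
      exact (hs2 x hx2).1 (by simp [hx1])
    · intro l' hl' c hc h1 h2
      rcases List.mem_cons.mp hl' with rfl | hl'
      · have := hc1 c hc h1 h2
        rcases List.mem_append.mp this with h | h
        · simp [h]
        · simp [h]
      · have := hc2 l' hl' c hc h1 h2
        rcases List.mem_append.mp this with h | h
        · rcases List.mem_append.mp h with h | h <;> simp [h]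
        · simp [h]

lemma phase1Round_spec (votes : List (Int × Int)) (σ : PySem.Dict Int Int)
    (frontier seen : List Int) :
    ∃ new, phase1Round votes σ frontier seen = (seen ++ new, new) ∧
      (∀ x ∈ new, x ∉ seen ∧ ∃ l ∈ frontier, ∃ c, EdgeP votes l c ∧ c ≠ l ∧
        σ.getD |c| (-1) = -1 ∧ x = -c) ∧
      new.Nodup ∧
      (∀ l ∈ frontier, ∀ c, EdgeP votes l c → c ≠ l → σ.getD |c| (-1) = -1 → -c ∈ seen ++ new) := by
  obtain ⟨d, h1, h2, h3, h4⟩ := phase1Round_fold votes σ frontier (seen, [])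
  exact ⟨d, by rw [phase1Round, h1]; simp, h2, h3, h4⟩

lemma reach_mem_lits (votes : List (Int × Int)) (σ : PySem.Dict Int Int) (s l : Int)
    (h : ReachP votes σ s l) : l ∈ s :: votes.flatMap (fun q => [-q.1, -q.2]) := by
  induction h with
  | base => exact List.mem_cons_self
  | step hr he hne hfree ihr =>
    rename_i l' c
    obtain ⟨q, hq, hlit, hval⟩ := he
    apply List.mem_cons_of_mem
    rw [List.mem_flatMap]
    refine ⟨q, hq, ?_⟩
    by_cases h1 : q.1 = l'
    · simp only [if_pos h1] at hval; simp [hval]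
    · simp only [if_neg h1] at hval; simp [hval]

lemma lits_length (votes : List (Int × Int)) (s : Int) :
    (s :: votes.flatMap (fun q => [-q.1, -q.2])).length = 2 * votes.length + 1 := by
  induction votes with
  | nil => simp
  | cons q votes ih => simp at ih ⊢; omega

-- a closed, sound superset containing s holds exactly the reachable literals

lemma closed_complete (votes : List (Int × Int)) (σ : PySem.Dict Int Int) (s : Int)
    (seen : List Int)
    (hsound : ∀ l ∈ seen, ReachP votes σ s l) (hs : s ∈ seen)
    (hclosed : ∀ l ∈ seen, ∀ c, EdgeP votes l c → c ≠ l → σ.getD |c| (-1) = -1 → -c ∈ seen) :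
    ∀ l, l ∈ seen ↔ ReachP votes σ s l := by
  intro l
  refine ⟨hsound l, fun h => ?_⟩
  induction h with
  | base => exact hs
  | step hr he hne hfree ihr => exact hclosed _ ihr _ he hne hfree

lemma phase1_spec (votes : List (Int × Int)) (σ : PySem.Dict Int Int) (s : Int) :
    ∀ (f : Nat) (seen frontier : List Int),
      seen.Nodup →
      (∀ l ∈ seen, ReachP votes σ s l) →
      s ∈ seen →
      (∀ l ∈ frontier, l ∈ seen) →
      (∀ l ∈ seen, l ∉ frontier → ∀ c, EdgeP votes l c → c ≠ l →
        σ.getD |c| (-1) = -1 → -c ∈ seen) →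
      2 * votes.length + 3 ≤ f + seen.length →
      ∀ l, l ∈ phase1 votes σ f seen frontier ↔ ReachP votes σ s l := by
  intro f
  induction f with
  | zero =>
    intro seen frontier h1 h2 h3 h4 h5 h6
    match frontier with
    | [] =>
      rw [phase1]
      exact closed_complete votes σ s seen h2 h3 (fun l hl c => h5 l hl (by simp) c)
    | l0 :: fr =>
      -- impossible: a nodup list of reachable literals cannot exceed the universe size
      exfalso
      have hsub : seen ⊆ s :: votes.flatMap (fun q => [-q.1, -q.2]) :=
        fun x hx => reach_mem_lits votes σ s x (h2 x hx)
      have := (List.subperm_of_subset h1 hsub).length_le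
      rw [lits_length] at this
      omega
  | succ f ih =>
    intro seen frontier h1 h2 h3 h4 h5 h6
    match frontier with
    | [] =>
      rw [phase1]
      exact closed_complete votes σ s seen h2 h3 (fun l hl c => h5 l hl (by simp) c)
    | l0 :: fr =>
      rw [phase1]
      obtain ⟨new, hr, hsnd, hnd, hproc⟩ := phase1Round_spec votes σ (l0 :: fr) seen
      simp only [hr]
      have hsound' : ∀ l ∈ seen ++ new, ReachP votes σ s l := by
        intro l hl
        rcases List.mem_append.mp hl with hl | hl
        · exact h2 l hl
        · obtain ⟨_, l', hl', c, hc, hne, hfree, rfl⟩ := hsnd l hl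
          exact ReachP.step (h2 l' (h4 l' hl')) hc hne hfree
      have hclosed' : ∀ l ∈ seen ++ new, l ∉ new → ∀ c, EdgeP votes l c → c ≠ l →
          σ.getD |c| (-1) = -1 → -c ∈ seen ++ new := by
        intro l hl hnew c hc hne hfree
        rcases List.mem_append.mp hl with hl | hl
        · by_cases hfr : l ∈ l0 :: fr
          · exact hproc l hfr c hc hne hfree
          · exact List.mem_append.mpr (Or.inl (h5 l hl hfr c hc hne hfree))
        · exact absurd hl hnew
      match hnew : new with
      | [] =>
        rw [phase1]
        simp only [List.append_nil]
        exact closed_complete votes σ s seen h2 h3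
          (fun l hl c hc hne hfree => by
            have := hclosed' l (by simp [hl]) (by simp) c hc hne hfree
            simpa using this)
      | x :: new' =>
        apply ih
        · exact List.Nodup.append h1 hnd (fun a ha1 ha2 => (hsnd a ha2).1 ha1)
        · exact hsound'
        · exact List.mem_append.mpr (Or.inl h3)
        · intro l hl; exact List.mem_append.mpr (Or.inr hl)
        · exact hclosed'
        · simp only [List.length_append, List.length_cons]
          omega

def BadQ (σ : PySem.Dict Int Int) (l : Int) (q : Int × Int) : Prop :=
  (q.1 = l ∨ q.2 = l) ∧
    ((if q.1 = l then q.2 else q.1) = l ∨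
     (σ.getD |if q.1 = l then q.2 else q.1| (-1) ≠ -1 ∧
      σ.getD |if q.1 = l then q.2 else q.1| (-1) ≠ sgn01 (if q.1 = l then q.2 else q.1)))

lemma scanP2_spec (σ : PySem.Dict Int Int) (l : Int) :
    ∀ (V : List (Int × Int)) (forced : List Int),
      (scanP2 σ l V forced = none ↔ ∃ q ∈ V, BadQ σ l q) ∧
      (∀ F, scanP2 σ l V forced = some F → ∀ x,
        x ∈ F ↔ x ∈ forced ∨ (EdgeP V l x ∧ x ≠ l ∧ σ.getD |x| (-1) = -1)) := by
  intro V
  induction V with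
  | nil =>
    intro forced
    constructor
    · simp [scanP2]
    · intro F hF x
      rw [scanP2] at hF
      cases hF
      simp [EdgeP]
  | cons q V ih =>
    intro forced
    rw [scanP2]
    by_cases hq : q.1 = l ∨ q.2 = l
    · rw [if_pos hq]
      set c := if q.1 = l then q.2 else q.1 with hc
      by_cases h1 : c = l
      · rw [if_pos h1]
        constructor
        · simp only [true_iff]
          exact ⟨q, List.mem_cons_self, hq, Or.inl h1⟩
        · intro F hF; cases hF
      · rw [if_neg h1]
        by_cases h2 : σ.getD |c| (-1) ≠ -1
        · rw [if_pos h2]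
          by_cases h3 : σ.getD |c| (-1) ≠ (if c > 0 then (1 : Int) else 0)
          · rw [if_pos h3]
            constructor
            · simp only [true_iff]
              exact ⟨q, List.mem_cons_self, hq, Or.inr ⟨h2, h3⟩⟩
            · intro F hF; cases hF
          · rw [if_neg h3]
            rw [not_not] at h3
            obtain ⟨ihn, ihs⟩ := ih forced
            constructor
            · rw [ihn]
              constructor
              · rintro ⟨q', hq', hbad⟩
                exact ⟨q', List.mem_cons_of_mem _ hq', hbad⟩
              · rintro ⟨q', hq', hbad⟩
                rcases List.mem_cons.mp hq' with rfl | hq'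
                · exfalso
                  rcases hbad.2 with hb | hb
                  · exact h1 hb
                  · exact hb.2 h3
                · exact ⟨q', hq', hbad⟩
            · intro F hF x
              rw [ihs F hF x]
              constructor
              · rintro (h | ⟨he, hx1, hx2⟩)
                · exact Or.inl h
                · obtain ⟨q', hq', hh⟩ := he
                  exact Or.inr ⟨⟨q', List.mem_cons_of_mem _ hq', hh⟩, hx1, hx2⟩
              · rintro (h | ⟨⟨q', hq', hlit, hval⟩, hx1, hx2⟩)
                · exact Or.inl h
                · rcases List.mem_cons.mp hq' with rfl | hq'
                  · exfalso
                    rw [← hc] at hval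
                    subst hval
                    exact h2 hx2
                  · exact Or.inr ⟨⟨q', hq', hlit, hval⟩, hx1, hx2⟩
        · rw [if_neg h2, not_not] at *
          -- c is free: collect it (if new)
          have key : ∀ fc : List Int, c ∈ fc →
              (scanP2 σ l V fc = none ↔ ∃ q' ∈ q :: V, BadQ σ l q') ∧
              (∀ F, scanP2 σ l V fc = some F → ∀ x,
                x ∈ F ↔ x ∈ fc ∨ (EdgeP (q :: V) l x ∧ x ≠ l ∧ σ.getD |x| (-1) = -1)) := by
            intro fc hcfc
            obtain ⟨ihn, ihs⟩ := ih fc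
            constructor
            · rw [ihn]
              constructor
              · rintro ⟨q', hq', hbad⟩
                exact ⟨q', List.mem_cons_of_mem _ hq', hbad⟩
              · rintro ⟨q', hq', hbad⟩
                rcases List.mem_cons.mp hq' with rfl | hq'
                · exfalso
                  rcases hbad.2 with hb | hb
                  · exact h1 hb
                  · exact hb.1 h2
                · exact ⟨q', hq', hbad⟩
            · intro F hF x
              rw [ihs F hF x]
              constructor
              · rintro (h | ⟨he, hx1, hx2⟩)
                · exact Or.inl h
                · obtain ⟨q', hq', hh⟩ := he
                  exact Or.inr ⟨⟨q', List.mem_cons_of_mem _ hq', hh⟩, hx1, hx2⟩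
              · rintro (h | ⟨⟨q', hq', hlit, hval⟩, hx1, hx2⟩)
                · exact Or.inl h
                · rcases List.mem_cons.mp hq' with rfl | hq'
                  · rw [← hc] at hval; subst hval
                    exact Or.inl hcfc
                  · exact Or.inr ⟨⟨q', hq', hlit, hval⟩, hx1, hx2⟩
          by_cases h4 : c ∉ forced
          · rw [if_pos h4]
            obtain ⟨kn, ks⟩ := key (forced ++ [c]) (by simp)
            refine ⟨kn, ?_⟩
            intro F hF x
            rw [ks F hF x]
            constructor
            · rintro (h | h)
              · rcases List.mem_append.mp h with h | h
                · exact Or.inl h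
                · simp only [List.mem_singleton] at h
                  subst h
                  exact Or.inr ⟨⟨q, List.mem_cons_self, hq, hc⟩, h1, h2⟩
              · exact Or.inr h
            · rintro (h | h)
              · exact Or.inl (List.mem_append.mpr (Or.inl h))
              · exact Or.inr h
          · rw [if_neg h4, not_not] at *
            obtain ⟨kn, ks⟩ := key forced h4
            exact ⟨kn, ks⟩
    · rw [if_neg hq]
      obtain ⟨ihn, ihs⟩ := ih forced
      constructor
      · rw [ihn]
        constructor
        · rintro ⟨q', hq', hbad⟩
          exact ⟨q', List.mem_cons_of_mem _ hq', hbad⟩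
        · rintro ⟨q', hq', hbad⟩
          rcases List.mem_cons.mp hq' with rfl | hq'
          · exact absurd hbad.1 hq
          · exact ⟨q', hq', hbad⟩
      · intro F hF x
        rw [ihs F hF x]
        constructor
        · rintro (h | ⟨he, hx1, hx2⟩)
          · exact Or.inl h
          · obtain ⟨q', hq', hh⟩ := he
            exact Or.inr ⟨⟨q', List.mem_cons_of_mem _ hq', hh⟩, hx1, hx2⟩
        · rintro (h | ⟨⟨q', hq', hlit, hval⟩, hx1, hx2⟩)
          · exact Or.inl h
          · rcases List.mem_cons.mp hq' with rfl | hq'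
            · exact absurd hlit hq
            · exact Or.inr ⟨⟨q', hq', hlit, hval⟩, hx1, hx2⟩

lemma phase2_spec (σ : PySem.Dict Int Int) (votes : List (Int × Int)) :
    ∀ (seen forced : List Int),
      (phase2 σ votes seen forced = none ↔ ∃ l ∈ seen, ∃ q ∈ votes, BadQ σ l q) ∧
      (∀ F, phase2 σ votes seen forced = some F → ∀ x,
        x ∈ F ↔ x ∈ forced ∨ ∃ l ∈ seen, EdgeP votes l x ∧ x ≠ l ∧ σ.getD |x| (-1) = -1) := by
  intro seen
  induction seen with
  | nil =>
    intro forced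
    constructor
    · simp [phase2]
    · intro F hF x
      rw [phase2] at hF
      cases hF
      simp
  | cons l seen ih =>
    intro forced
    rw [phase2]
    obtain ⟨sn, ss⟩ := scanP2_spec σ l votes forced
    cases hscan : scanP2 σ l votes forced with
    | none =>
      constructor
      · simp only [true_iff]
        obtain ⟨q, hq, hbad⟩ := sn.mp hscan
        exact ⟨l, List.mem_cons_self, q, hq, hbad⟩
      · intro F hF; cases hF
    | some f' =>
      obtain ⟨ihn, ihs⟩ := ih f'
      constructor
      · rw [ihn]
        constructor
        · rintro ⟨l', hl', hb⟩
          exact ⟨l', List.mem_cons_of_mem _ hl', hb⟩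
        · rintro ⟨l', hl', q, hq, hbad⟩
          rcases List.mem_cons.mp hl' with rfl | hl'
          · exfalso
            have : scanP2 σ l' votes forced = none := sn.mpr ⟨q, hq, hbad⟩
            rw [hscan] at this; cases this
          · exact ⟨l', hl', q, hq, hbad⟩
      · intro F hF x
        rw [ihs F hF x, ss f' hscan x]
        constructor
        · rintro ((h | h) | ⟨l', hl', hrest⟩)
          · exact Or.inl h
          · exact Or.inr ⟨l, List.mem_cons_self, h⟩
          · exact Or.inr ⟨l', List.mem_cons_of_mem _ hl', hrest⟩
        · rintro (h | ⟨l', hl', hrest⟩)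
          · exact Or.inl (Or.inl h)
          · rcases List.mem_cons.mp hl' with rfl | hl'
            · exact Or.inl (Or.inr hrest)
            · exact Or.inr ⟨l', hl', hrest⟩

lemma badq_fail (votes : List (Int × Int)) (σ : PySem.Dict Int Int) (s l : Int)
    (hl : ReachP votes σ s l) (q : Int × Int) (hq : q ∈ votes) (hbad : BadQ σ l q) :
    FailP votes σ s := by
  obtain ⟨hlit, hb⟩ := hbad
  rcases hb with hb | hb
  · left
    refine ⟨l, hl, ?_⟩
    by_cases h1 : q.1 = l
    · rw [if_pos h1] at hb
      have : q = (l, l) := Prod.ext h1 hb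
      rwa [← this]
    · rw [if_neg h1] at hb
      exact absurd hb h1
  · right; left
    exact ⟨l, if q.1 = l then q.2 else q.1, hl, ⟨q, hq, hlit, rfl⟩, hb.1, hb.2⟩

lemma checkB_iff (votes : List (Int × Int)) (σ : PySem.Dict Int Int) (s : Int) :
    checkB votes σ s = true ↔ ¬ FailP votes σ s := by
  unfold checkB
  have hseen : ∀ l, l ∈ phase1 votes σ (2 * votes.length + 2) [s] [s] ↔ ReachP votes σ s l := by
    exact phase1_spec votes σ s (2 * votes.length + 2) [s] [s] (by simp)
      (fun l hl => by rw [List.mem_singleton] at hl; subst hl; exact ReachP.base)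
      (List.mem_singleton.mpr rfl) (fun l hl => hl) (fun l hl hnl => absurd hl hnl)
      (by simp only [List.length_cons, List.length_nil]; omega)
  set seen := phase1 votes σ (2 * votes.length + 2) [s] [s] with hseendef
  obtain ⟨p2n, p2s⟩ := phase2_spec σ votes seen []
  cases hp2 : phase2 σ votes seen [] with
  | none =>
    obtain ⟨l, hl, q, hq, hbad⟩ := p2n.mp hp2
    have hfail : FailP votes σ s := badq_fail votes σ s l ((hseen l).mp hl) q hq hbad
    exact iff_of_false (by simp) (not_not_intro hfail)
  | some F =>
    show F.all (fun c => decide ((-c) ∉ F)) = true ↔ ¬ FailP votes σ s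
    have hF : ∀ x, x ∈ F ↔ ForcedP votes σ s x := by
      intro x
      rw [p2s F hp2 x]
      simp only [List.not_mem_nil, false_or]
      constructor
      · rintro ⟨l, hl, h⟩; exact ⟨l, (hseen l).mp hl, h⟩
      · rintro ⟨l, hl, h⟩; exact ⟨l, (hseen l).mpr hl, h⟩
    have hnone : ¬ (∃ l ∈ seen, ∃ q ∈ votes, BadQ σ l q) := by
      intro h
      rw [← p2n, hp2] at h
      cases h
    constructor
    · intro hall hfail
      rcases hfail with ⟨l, hl, hq⟩ | ⟨l, c, hl, he, h1, h2⟩ | ⟨c, hc1, hc2⟩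
      · exact hnone ⟨l, (hseen l).mpr hl, (l, l), hq, Or.inl rfl, by simp⟩
      · obtain ⟨q, hqv, hlit, hval⟩ := he
        exact hnone ⟨l, (hseen l).mpr hl, q, hqv, hlit, Or.inr (by rw [← hval]; exact ⟨h1, h2⟩)⟩
      · rw [List.all_eq_true] at hall
        have h1 := (hF c).mpr hc1
        have h2 := (hF (-c)).mpr hc2
        have := hall c h1
        simp at this
        exact this h2
    · intro hnf
      rw [List.all_eq_true]
      intro c hc
      simp only [decide_eq_true_eq]
      intro hneg
      exact hnf (Or.inr (Or.inr ⟨c, (hF c).mp hc, (hF (-c)).mp hneg⟩))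

-- ---------- outer loop ----------

lemma outer_eq (count : Int) (votes : List (Int × Int)) (hNZ : NZ votes) :
    ∀ (is : List Int) (law : PySem.Dict Int Int), (∀ i ∈ is, 1 ≤ i) →
      outerA count (buildG votes) (votes.map (fun p => PySem.Set.ofList [p.1, p.2]))
        (2 * votes.length + 2) is law = outerB count votes is law := by
  intro is
  induction is with
  | nil => intro law _; rw [outerA, outerB]
  | cons i rest ih =>
    intro law hge
    have hi : 1 ≤ i := hge i List.mem_cons_self
    have e1 : (settingA (buildG votes) (votes.map (fun p => PySem.Set.ofList [p.1, p.2]))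
        (2 * votes.length + 2) i true law).1 = checkB votes law (-i) := by
      rw [Bool.eq_iff_iff, settingA_iff votes law hNZ i hi true, checkB_iff]
      rfl
    have e0 : (settingA (buildG votes) (votes.map (fun p => PySem.Set.ofList [p.1, p.2]))
        (2 * votes.length + 2) i false law).1 = checkB votes law i := by
      rw [Bool.eq_iff_iff, settingA_iff votes law hNZ i hi false, checkB_iff]
      rfl
    have hrest := fun law' => ih law' (fun j hj => hge j (List.mem_cons_of_mem _ hj))
    rw [outerA, outerB, e1, e0]
    by_cases hb1 : checkB votes law (-i) = true
    · rw [if_pos hb1, if_pos hb1, hrest]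
    · rw [if_neg hb1, if_neg hb1]
      by_cases hb0 : checkB votes law i = true
      · rw [if_pos hb0, if_pos hb0, hrest]
      · rw [if_neg hb0, if_neg hb0]

-- ===== VERDICT (by name: the statement is the Claim_ definition above) =====
theorem solution_spec : Claim_equal_solution := by
  unfold Claim_equal_solution
  intro count votes _ hpre
  unfold Spec_solution solution solution_alt
  exact outer_eq count votes hpre _ _ (fun i hi => by
    have := PySem.List.mem_pyRange_one.mp hi; omega)
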